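-- pv_equiv track=rewrite | github.com/nihilistsumo/TREC-CAR-n-fold-cv | treccar-scripts/treccar-cv/tree-qrels-for-simpara.py | convert_simpara_qrels
-- ===== SOURCE A (Python) =====
-- def convert_simpara_qrels(tree_qrels_dict):
--     reversed_simpara_qrels_dict = {}
--     for page in tree_qrels_dict.keys():
--         reversed_qrels = {}
--         for q in tree_qrels_dict[page].keys():
--             for p in tree_qrels_dict[page][q]:
--                 if p not in reversed_qrels.keys() or len(reversed_qrels[p].split("/"))<len(q.split("/")):
--                     reversed_qrels[p] = q
--         reversed_simpara_qrels_dict[page] = reversed_qrels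
--     return reversed_simpara_qrels_dict
-- ===== SOURCE B (Python) =====
-- def convert_simpara_qrels(tree_qrels_dict):
--     # gather-then-reduce: per page collect every query listing a paragraph, then
--     # keep the first query of maximal slash-depth (Python max keeps the first maximum)
--     out = {}
--     for page, qrels in tree_qrels_dict.items():
--         para_qs = {}
--         for q, ps in qrels.items():
--             for p in ps:
--                 para_qs.setdefault(p, []).append(q)
--         out[page] = {p: max(qs, key=lambda q: len(q.split("/")))
--                      for p, qs in para_qs.items()}
--     return out
-- ===== Notes on version B (the rewrite author's own statement) =====
-- stated objective: simpler
-- what changed: Replaces A's interleaved compare-and-overwrite of the reversed dict with a gather-then-reduce decomposition: first build paragraph -> list of queries in encounter order, then reduce each list with max(key=slash-depth), whose first-maximum tie-break reproduces A's keep-first rule.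
import Mathlib
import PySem

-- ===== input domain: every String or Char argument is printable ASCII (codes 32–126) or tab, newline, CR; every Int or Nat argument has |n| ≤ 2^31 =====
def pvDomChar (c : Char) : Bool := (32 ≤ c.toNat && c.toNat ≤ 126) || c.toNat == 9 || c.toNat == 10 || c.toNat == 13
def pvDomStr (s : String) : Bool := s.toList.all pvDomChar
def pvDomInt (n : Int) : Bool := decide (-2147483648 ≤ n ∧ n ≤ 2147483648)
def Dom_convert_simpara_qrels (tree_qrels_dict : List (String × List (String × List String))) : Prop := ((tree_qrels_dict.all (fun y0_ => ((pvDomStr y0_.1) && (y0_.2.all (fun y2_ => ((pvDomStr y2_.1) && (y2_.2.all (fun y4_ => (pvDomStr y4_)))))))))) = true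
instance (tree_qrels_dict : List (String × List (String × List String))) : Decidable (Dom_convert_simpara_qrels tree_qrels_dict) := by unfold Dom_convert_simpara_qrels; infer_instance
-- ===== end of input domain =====

-- B replaces A's interleaved compare-and-overwrite with a gather-then-reduce decomposition (objective: simpler; same cost).


-- ===== PORT A =====
-- len(q.split("/")) ("/"≠"", so split? is always some)
def pvDepth (q : String) : Nat := ((PySem.Str.split? q "/").getD []).length

-- body of A's innermost loop: if p not in rd or len(rd[p].split("/")) < len(q.split("/")): rd[p] = q
def pvStepA (rd : PySem.Dict String String) (q p : String) : PySem.Dict String String :=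
  if rd.contains p = false || decide (pvDepth (rd.getD p "") < pvDepth q) then rd.insert p q else rd

-- A's middle loop: for q in tree_qrels_dict[page].keys(): for p in tree_qrels_dict[page][q]: …
def pvRevA (qrels : List (String × List String)) : PySem.Dict String String :=
  qrels.foldl
    (fun rd qPr => ((PySem.Dict.mk qrels).getD qPr.1 []).foldl (fun rd p => pvStepA rd qPr.1 p) rd)
    PySem.Dict.empty

def convert_simpara_qrels (tree_qrels_dict : List (String × List (String × List String))) : List (String × List (String × String)) :=
  (tree_qrels_dict.foldl
    (fun out pr => out.insert pr.1 (pvRevA ((PySem.Dict.mk tree_qrels_dict).getD pr.1 [])).items)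
    (PySem.Dict.empty : PySem.Dict String (List (String × String)))).items

-- ===== PORT B =====
-- B's gather pass: para_qs.setdefault(p, []).append(q)  (= para_qs[p] = para_qs.get(p, []) + [q], i.e. Dict.modify)
def pvGather (qrels : List (String × List String)) : PySem.Dict String (List String) :=
  qrels.foldl
    (fun g qPr => qPr.2.foldl (fun g p => g.modify p [] (· ++ [qPr.1])) g)
    PySem.Dict.empty

-- B's reduce pass: max(qs, key=lambda q: len(q.split("/"))); qs is never empty by construction, "" is a dead default
def pvReduce (qs : List String) : String := PySem.List.maxD qs pvDepth ""

def convert_simpara_qrels_alt (tree_qrels_dict : List (String × List (String × List String))) : List (String × List (String × String)) :=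
  (tree_qrels_dict.foldl
    (fun out pr => out.insert pr.1 ((pvGather pr.2).items.map (fun pq => (pq.1, pvReduce pq.2))))
    (PySem.Dict.empty : PySem.Dict String (List (String × String)))).items

-- ===== PRECONDITION & SPEC =====
-- Pre_ excludes only association lists with duplicate page keys, or duplicate query keys inside a page:
-- those do not represent any Python dict (A's argument is a dict), so they exclude nothing A is ever called on.
def Pre_convert_simpara_qrels (tree_qrels_dict : List (String × List (String × List String))) : Prop :=
  (tree_qrels_dict.map Prod.fst).Nodup ∧ ∀ pr ∈ tree_qrels_dict, (pr.2.map Prod.fst).Nodup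
instance (tree_qrels_dict : List (String × List (String × List String))) : Decidable (Pre_convert_simpara_qrels tree_qrels_dict) := by unfold Pre_convert_simpara_qrels; infer_instance

def pvWitness_convert_simpara_qrels : (List (String × List (String × List String))) :=
  [("page1", [("page1/s1", ["p1", "p2"]), ("page1", ["p2", "p3"])])]

def Spec_convert_simpara_qrels (tree_qrels_dict : List (String × List (String × List String))) (out : List (String × List (String × String))) : Prop := out = convert_simpara_qrels_alt tree_qrels_dict
instance (tree_qrels_dict : List (String × List (String × List String))) (out : List (String × List (String × String))) : Decidable (Spec_convert_simpara_qrels tree_qrels_dict out) := by unfold Spec_convert_simpara_qrels; infer_instance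

-- ===== CLAIM (what is proved, stated in full; the proofs are below) =====
def Claim_equal_convert_simpara_qrels : Prop := ∀ (tree_qrels_dict : List (String × List (String × List String))), Dom_convert_simpara_qrels tree_qrels_dict → Pre_convert_simpara_qrels tree_qrels_dict → Spec_convert_simpara_qrels tree_qrels_dict (convert_simpara_qrels tree_qrels_dict)

-- ===== LEMMAS AND PROOFS =====

-- the dict B's reduce is mapped over, as a Dict (its items are what convert_simpara_qrels_alt stores per page)
def pvToA (g : PySem.Dict String (List String)) : PySem.Dict String String :=
  PySem.Dict.mk (g.items.map (fun pq => (pq.1, pvReduce pq.2)))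

-- flatten a nested fold over an association list into a fold over (key, element) events
theorem pv_foldl_flatten {α β γ : Type} (l : List (α × List β)) (step : γ → α → β → γ) (init : γ) :
    l.foldl (fun acc pr => pr.2.foldl (fun acc b => step acc pr.1 b) acc) init
    = (l.flatMap (fun pr => pr.2.map (fun b => (pr.1, b)))).foldl (fun acc e => step acc e.1 e.2) init := by
  induction l generalizing init with
  | nil => rfl
  | cons x xs ih => simp [List.foldl_append, List.foldl_map, ih]

theorem pv_get?_pvToA (g : PySem.Dict String (List String)) (k : String) :
    (pvToA g).get? k = (g.get? k).map pvReduce := by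
  obtain ⟨l⟩ := g
  induction l with
  | nil => rfl
  | cons x xs ih =>
    show (PySem.Dict.mk ((x :: xs).map (fun pq => (pq.1, pvReduce pq.2)))).get? k = _
    rw [List.map_cons, PySem.Dict.get?_mk_cons, PySem.Dict.get?_mk_cons]
    by_cases h : (x.1 == k) = true
    · simp [h]
    · simp only [h, Bool.false_eq_true, if_false, Option.map]
      exact ih

theorem pv_contains_pvToA (g : PySem.Dict String (List String)) (k : String) :
    (pvToA g).contains k = g.contains k := by
  rw [PySem.Dict.contains_eq_isSome_get?, PySem.Dict.contains_eq_isSome_get?, pv_get?_pvToA]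
  cases g.get? k <;> rfl

theorem pv_max?_isSome {qs : List String} (h : qs ≠ []) : (PySem.List.max? qs pvDepth).isSome := by
  cases qs with
  | nil => exact absurd rfl h
  | cons a l =>
    simp only [PySem.List.max?, List.foldl_cons]
    induction l generalizing a with
    | nil => rfl
    | cons y ys ih =>
      simp only [List.foldl_cons]
      by_cases hy : pvDepth a < pvDepth y
      · simpa [hy] using ih y
      · simpa [hy] using ih a

theorem pv_reduce_append {qs : List String} (q : String) (h : qs ≠ []) :
    pvReduce (qs ++ [q]) = if pvDepth (pvReduce qs) < pvDepth q then q else pvReduce qs := by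
  obtain ⟨m, hm⟩ := Option.isSome_iff_exists.mp (pv_max?_isSome h)
  simp only [pvReduce, PySem.List.maxD, PySem.List.max?, List.foldl_append]
  simp only [PySem.List.max?] at hm
  rw [hm]
  by_cases hd : pvDepth m < pvDepth q <;> simp [hd]

theorem pv_step (g : PySem.Dict String (List String)) (q p : String)
    (hnd : g.keys.Nodup) (hne : ∀ pq ∈ g.items, pq.2 ≠ []) :
    pvStepA (pvToA g) q p = pvToA (g.modify p [] (· ++ [q])) := by
  by_cases hc : g.contains p = true
  · -- p already gathered with list qs: B replaces it by qs ++ [q]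
    have hs : (g.get? p).isSome := by rw [← PySem.Dict.contains_eq_isSome_get?]; exact hc
    obtain ⟨qs, hqs⟩ := Option.isSome_iff_exists.mp hs
    have hmem : (p, qs) ∈ g.items := (PySem.Dict.get?_eq_some_iff_mem_items g p qs hnd).mp hqs
    have hqsne : qs ≠ [] := hne _ hmem
    have hgd : g.getD p [] = qs := by simp [PySem.Dict.getD_eq_get?_getD, hqs]
    have hAc : (pvToA g).contains p = true := by rw [pv_contains_pvToA]; exact hc
    have hAg : (pvToA g).getD p "" = pvReduce qs := by
      simp [PySem.Dict.getD_eq_get?_getD, pv_get?_pvToA, hqs]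
    have huniq : ∀ r ∈ g.items, r.1 = p → r.2 = qs := by
      intro r hr hrp
      have := PySem.Dict.get?_of_mem_items g (k := r.1) (v := r.2) hr hnd
      rw [hrp, hqs] at this
      exact (Option.some.injEq _ _).mp this.symm
    have hmod : (g.modify p [] (· ++ [q])).items
        = g.items.map (fun r => if (r.1 == p) = true then (p, qs ++ [q]) else r) := by
      simp only [PySem.Dict.modify, hgd]
      exact PySem.Dict.items_insert_of_contains g _ hc
    apply PySem.Dict.ext
    by_cases hd : pvDepth (pvReduce qs) < pvDepth q
    · -- A overwrites with q; B's reduce of qs ++ [q] is q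
      have hcond : (decide ((pvToA g).contains p = false)
          || decide (pvDepth ((pvToA g).getD p "") < pvDepth q)) = true := by
        simp [hAg, hd]
      simp only [pvStepA, hcond, if_true]
      rw [PySem.Dict.items_insert_of_contains _ _ hAc]
      simp only [pvToA, hmod, List.map_map]
      apply List.map_congr_left
      intro r hr
      by_cases hrp : (r.1 == p) = true
      · simp only [Function.comp, hrp, if_true]
        rw [pv_reduce_append q hqsne, if_pos hd]
      · simp [Function.comp, hrp]
    · -- A keeps the old winner; B's reduce of qs ++ [q] is still pvReduce qs
      have hcond : ¬ ((decide ((pvToA g).contains p = false)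
          || decide (pvDepth ((pvToA g).getD p "") < pvDepth q)) = true) := by
        simp [hAc, hAg, hd]
      simp only [pvStepA, if_neg hcond]
      simp only [pvToA, hmod, List.map_map]
      apply (List.map_congr_left ?_).symm
      intro r hr
      by_cases hrp : (r.1 == p) = true
      · have h2 : r.2 = qs := huniq r hr (by simpa using hrp)
        have hr1 : r.1 = p := by simpa using hrp
        simp only [Function.comp, hrp, if_true]
        rw [h2, pv_reduce_append q hqsne, if_neg hd, ← hr1, ← h2]
      · simp [Function.comp, hrp]
  · -- p fresh: both append at the end
    have hc' : g.contains p = false := by simpa using hc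
    have hAc : (pvToA g).contains p = false := by rw [pv_contains_pvToA]; exact hc'
    have hgd : g.getD p [] = [] := PySem.Dict.getD_of_not_contains g [] hc'
    have hcond : (decide ((pvToA g).contains p = false)
        || decide (pvDepth ((pvToA g).getD p "") < pvDepth q)) = true := by
      simp [hAc]
    apply PySem.Dict.ext
    simp only [pvStepA, hcond, if_true]
    rw [PySem.Dict.items_insert_of_not_contains _ _ hAc]
    simp only [PySem.Dict.modify, hgd, List.nil_append]
    rw [show (pvToA (g.insert p [q])).items
        = (g.insert p [q]).items.map (fun pq => (pq.1, pvReduce pq.2)) from rfl]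
    rw [PySem.Dict.items_insert_of_not_contains _ _ hc']
    simp [pvToA, pvReduce, PySem.List.maxD, PySem.List.max?]

theorem pv_modify_nodup (g : PySem.Dict String (List String)) (q p : String) (hnd : g.keys.Nodup) :
    (g.modify p [] (· ++ [q])).keys.Nodup := PySem.Dict.nodup_keys_insert _ _ _ hnd

theorem pv_modify_ne (g : PySem.Dict String (List String)) (q p : String)
    (hne : ∀ pq ∈ g.items, pq.2 ≠ []) :
    ∀ pq ∈ (g.modify p [] (· ++ [q])).items, pq.2 ≠ [] := by
  intro pq hpq
  simp only [PySem.Dict.modify, PySem.Dict.insert] at hpq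
  by_cases hc : g.contains p = true
  · simp only [hc, if_true] at hpq
    obtain ⟨r, hr, hrr⟩ := List.mem_map.mp hpq
    by_cases hrp : (r.1 == p) = true
    · simp only [hrp, if_true] at hrr; simp [← hrr]
    · simp only [hrp] at hrr; simp only [Bool.false_eq_true, if_false] at hrr
      exact hrr ▸ hne r hr
  · simp only [hc] at hpq
    rcases List.mem_append.mp hpq with h | h
    · exact hne _ h
    · simp only [List.mem_singleton] at h; simp [h]

theorem pv_invariant (ev : List (String × String)) :
    ∀ (g : PySem.Dict String (List String)), g.keys.Nodup → (∀ pq ∈ g.items, pq.2 ≠ []) →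
    ev.foldl (fun rd e => pvStepA rd e.1 e.2) (pvToA g)
      = pvToA (ev.foldl (fun g e => g.modify e.2 [] (· ++ [e.1])) g) := by
  induction ev with
  | nil => intro g _ _; rfl
  | cons e ev ih =>
    intro g hnd hne
    simp only [List.foldl_cons]
    rw [pv_step g e.1 e.2 hnd hne]
    exact ih _ (pv_modify_nodup g e.1 e.2 hnd) (pv_modify_ne g e.1 e.2 hne)

theorem pv_page (qrels : List (String × List String)) (hnd : (qrels.map Prod.fst).Nodup) :
    (pvRevA qrels).items = (pvGather qrels).items.map (fun pq => (pq.1, pvReduce pq.2)) := by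
  have hkd : (PySem.Dict.mk qrels).keys.Nodup := by simpa [PySem.Dict.keys_mk] using hnd
  have hlook : ∀ qPr ∈ qrels, (PySem.Dict.mk qrels).getD qPr.1 [] = qPr.2 := by
    intro qPr hq
    have : (PySem.Dict.mk qrels).get? qPr.1 = some qPr.2 :=
      PySem.Dict.get?_of_mem_items _ (by exact hq) hkd
    simp [PySem.Dict.getD_eq_get?_getD, this]
  have h1 : pvRevA qrels
      = qrels.foldl (fun rd qPr => qPr.2.foldl (fun rd p => pvStepA rd qPr.1 p) rd) PySem.Dict.empty := by
    unfold pvRevA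
    exact PySem.List.foldl_congr_mem qrels _ _ _ (fun acc qPr hq => by rw [hlook qPr hq])
  have hA := pv_foldl_flatten qrels (fun rd q p => pvStepA rd q p) (PySem.Dict.empty : PySem.Dict String String)
  have hB := pv_foldl_flatten qrels
      (fun g (q p : String) => g.modify p [] (· ++ [q])) (PySem.Dict.empty : PySem.Dict String (List String))
  have hmain := pv_invariant (qrels.flatMap (fun pr => pr.2.map (fun b => (pr.1, b))))
      PySem.Dict.empty (by simp [PySem.Dict.keys_mk, PySem.Dict.empty]) (by intro pq h; simp [PySem.Dict.empty] at h)
  have hToAempty : pvToA PySem.Dict.empty = PySem.Dict.empty := rfl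
  rw [h1, hA]
  rw [← hToAempty, hmain]
  unfold pvGather
  rw [hB]
  rfl

-- ===== VERDICT (by name: the statement is the Claim_ definition above) =====
theorem convert_simpara_qrels_spec : Claim_equal_convert_simpara_qrels := by
  intro t _hdom hpre
  obtain ⟨hnd, hinner⟩ := hpre
  unfold Spec_convert_simpara_qrels convert_simpara_qrels convert_simpara_qrels_alt
  have hA := PySem.Dict.items_foldl_insert_fresh t Prod.fst
      (fun pr => (pvRevA ((PySem.Dict.mk t).getD pr.1 [])).items)
      (PySem.Dict.empty : PySem.Dict String (List (String × String)))
      (by intro a _; rfl) hnd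
  have hB := PySem.Dict.items_foldl_insert_fresh t Prod.fst
      (fun pr => (pvGather pr.2).items.map (fun pq => (pq.1, pvReduce pq.2)))
      (PySem.Dict.empty : PySem.Dict String (List (String × String)))
      (by intro a _; rfl) hnd
  rw [hA, hB]
  simp only [show (PySem.Dict.empty : PySem.Dict String (List (String × String))).items = [] from rfl,
    List.nil_append]
  apply List.map_congr_left
  intro pr hpr
  have hkd : (PySem.Dict.mk t).keys.Nodup := by simpa [PySem.Dict.keys_mk] using hnd
  have hlook : (PySem.Dict.mk t).getD pr.1 [] = pr.2 := by
    have : (PySem.Dict.mk t).get? pr.1 = some pr.2 :=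
      PySem.Dict.get?_of_mem_items _ (by exact hpr) hkd
    simp [PySem.Dict.getD_eq_get?_getD, this]
  simp only [hlook, pv_page pr.2 (hinner pr hpr)]
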